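-- pv_equiv track=rewrite | github.com/joshuamschultz/Arc | packages/arcagent/src/arcagent/modules/user_profile/models.py | _parse_body_sections
-- ===== SOURCE A (Python) =====
-- def _parse_body_sections(body: str) -> tuple[str, str, str, str]:
--     """Split body into (identity, preferences, durable_raw, derived) sections.
--
--     Returns empty strings for missing sections.  The durable_raw section
--     is the raw markdown content so that individual facts can be parsed.
--     """
--     sections: dict[str, str] = {
--         "identity": "",
--         "preferences": "",
--         "durable facts": "",
--         "derived (dialectic)": "",
--     }
--     current: str | None = None
--     buf: list[str] = []
--
--     for line in body.splitlines():
--         header = line.strip().lower()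
--         if header.startswith("## "):
--             # Save previous section
--             if current is not None:
--                 sections[current] = "\n".join(buf).strip()
--             key = header[3:].strip()
--             if key in sections:
--                 current = key
--                 buf = []
--             else:
--                 # Unknown section — treat as continuation of previous
--                 buf.append(line)
--         else:
--             buf.append(line)
--
--     if current is not None:
--         sections[current] = "\n".join(buf).strip()
--
--     return (
--         sections["identity"],
--         sections["preferences"],
--         sections["durable facts"],
--         sections["derived (dialectic)"],
--     )
-- ===== SOURCE B (Python) =====
-- _KEYS = ("identity", "preferences", "durable facts", "derived (dialectic)")
--
--
-- def _header_key(line):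
--     """Return the section key if line is a recognized '## ' header, else None."""
--     h = line.strip().lower()
--     if h.startswith("## "):
--         key = h[3:].strip()
--         if key in _KEYS:
--             return key
--     return None
--
--
-- def _parse_body_sections(body):
--     lines = body.splitlines()
--     # First pass: indices of recognized section headers, paired with their keys.
--     headers = [(i, key) for i, line in enumerate(lines)
--                if (key := _header_key(line)) is not None]
--     # Each section runs from just after its header to the next recognized header.
--     ends = [i for i, _ in headers[1:]] + [len(lines)]
--     sections = {key: "" for key in _KEYS}
--     for (i, key), end in zip(headers, ends):
--         sections[key] = "\n".join(lines[i + 1:end]).strip()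
--     return (sections["identity"], sections["preferences"],
--             sections["durable facts"], sections["derived (dialectic)"])
-- ===== Notes on version B (the rewrite author's own statement) =====
-- stated objective: alternative
-- what changed: A's single-pass state machine (current-section variable plus a line buffer with save-on-header) is replaced by a two-pass plan: first collect the indices of recognized section headers, then slice the line list between consecutive recognized headers and join/strip each slice into its section.
import Mathlib
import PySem

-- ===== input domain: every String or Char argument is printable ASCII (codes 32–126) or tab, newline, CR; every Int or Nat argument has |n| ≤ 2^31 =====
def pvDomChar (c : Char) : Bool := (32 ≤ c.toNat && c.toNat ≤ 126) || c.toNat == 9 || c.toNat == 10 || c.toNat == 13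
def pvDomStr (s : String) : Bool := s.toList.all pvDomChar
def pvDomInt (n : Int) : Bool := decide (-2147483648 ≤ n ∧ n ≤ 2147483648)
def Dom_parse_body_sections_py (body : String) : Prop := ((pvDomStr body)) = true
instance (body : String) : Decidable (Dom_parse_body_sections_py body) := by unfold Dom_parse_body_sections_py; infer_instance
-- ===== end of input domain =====

-- B replaces A's one-pass state machine (current section + line buffer) by a two-pass plan:
-- collect the indices of the recognized section headers, then slice the line list between
-- consecutive recognized headers; same return value (objective: alternative decomposition).

-- ===== PORT A =====
-- one step of A's for-loop; state = (sections dict, current, buf)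
def pvStepA (st : PySem.Dict String String × Option String × List String) (line : String) :
    PySem.Dict String String × Option String × List String :=
  match st with
  | (sections, current, buf) =>
    let header := PySem.Str.lower (PySem.Str.strip line)
    if PySem.Str.startswith header "## " then
      -- save previous section
      let sections := match current with
        | some cur => sections.insert cur (PySem.Str.strip (PySem.Str.join "\n" buf))
        | none => sections
      let key := PySem.Str.strip (PySem.Str.slice header (some 3) none)
      if sections.contains key then (sections, some key, ([] : List String))
      else (sections, current, buf ++ [line])
    else (sections, current, buf ++ [line])

def parse_body_sections_py (body : String) : String × String × String × String :=
  let init : PySem.Dict String String × Option String × List String :=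
    (PySem.Dict.ofList [("identity", ""), ("preferences", ""),
                        ("durable facts", ""), ("derived (dialectic)", "")], none, [])
  let st := (PySem.Str.splitlines body).foldl pvStepA init
  let sections := match st.2.1 with
    | some cur => st.1.insert cur (PySem.Str.strip (PySem.Str.join "\n" st.2.2))
    | none => st.1
  (sections.getD "identity" "", sections.getD "preferences" "",
   sections.getD "durable facts" "", sections.getD "derived (dialectic)" "")

-- ===== PORT B =====
def pvKeysB : List String := ["identity", "preferences", "durable facts", "derived (dialectic)"]

-- Source B's _header_key
def pvHeaderKey (line : String) : Option String :=
  let h := PySem.Str.lower (PySem.Str.strip line)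
  if PySem.Str.startswith h "## " then
    let key := PySem.Str.strip (PySem.Str.slice h (some 3) none)
    if pvKeysB.contains key then some key else none
  else none

-- first pass: [(i, key) for i, line in enumerate(lines) if (key := _header_key(line)) is not None]
def pvHeadersB (lines : List String) : List (Nat × String) :=
  (lines.zipIdx).filterMap (fun p => (pvHeaderKey p.1).map (fun k => (p.2, k)))

def parse_body_sections_py_alt (body : String) : String × String × String × String :=
  let lines := PySem.Str.splitlines body
  let headers := pvHeadersB lines
  let ends := (headers.drop 1).map Prod.fst ++ [lines.length]
  let sections := (headers.zip ends).foldl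
    (fun d p =>
      d.insert p.1.2 (PySem.Str.strip (PySem.Str.join "\n"
        (PySem.List.slice lines (some ((p.1.1 + 1 : Nat) : Int)) (some ((p.2 : Nat) : Int))))))
    (pvKeysB.foldl (fun d k => d.insert k "") PySem.Dict.empty)
  (sections.getD "identity" "", sections.getD "preferences" "",
   sections.getD "durable facts" "", sections.getD "derived (dialectic)" "")

-- ===== PRECONDITION & SPEC =====
def Spec_parse_body_sections_py (body : String) (out : String × String × String × String) : Prop := out = parse_body_sections_py_alt body
instance (body : String) (out : String × String × String × String) : Decidable (Spec_parse_body_sections_py body out) := by unfold Spec_parse_body_sections_py; infer_instance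

-- ===== CLAIM (what is proved, stated in full; the proofs are below) =====
def Claim_equal_parse_body_sections_py : Prop := ∀ (body : String), Dom_parse_body_sections_py body → Spec_parse_body_sections_py body (parse_body_sections_py body)

-- ===== LEMMAS AND PROOFS =====

-- "\n".join(xs).strip(), the stored content of a section
def pvC (xs : List String) : String := PySem.Str.strip (PySem.Str.join "\n" xs)

-- the key computed from a '## ' line
def pvKeyOf (l : String) : String :=
  PySem.Str.strip (PySem.Str.slice (PySem.Str.lower (PySem.Str.strip l)) (some 3) none)

-- generic "cut into (key, content) pairs at recognized headers" (hk abstract so the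
-- well-founded recursion elaborates without unfolding string literals)
def pvGenPairs (hk : String → Option String) (cont : List String → String) :
    List String → List (String × String)
  | [] => []
  | l :: ls =>
    match hk l with
    | some k =>
        (k, cont (ls.takeWhile (fun x => !(hk x).isSome))) ::
          pvGenPairs hk cont (ls.dropWhile (fun x => !(hk x).isSome))
    | none => pvGenPairs hk cont ls
  termination_by ls => ls.length
  decreasing_by
  · exact Nat.lt_succ_of_le (List.length_dropWhile_le _ _)
  · exact Nat.lt_succ_of_le (Nat.le_refl _)

-- the (key, stripped content) pairs of the recognized sections, in order of appearance
def pvPairs : List String → List (String × String) := pvGenPairs pvHeaderKey pvC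

-- folding the section pairs into the dict (duplicates overwrite)
def pvFoldPairs (d : PySem.Dict String String) (ps : List (String × String)) : PySem.Dict String String :=
  ps.foldl (fun d p => d.insert p.1 p.2) d

-- A's final save
def pvAfin (st : PySem.Dict String String × Option String × List String) : PySem.Dict String String :=
  match st.2.1 with
  | some cur => st.1.insert cur (PySem.Str.strip (PySem.Str.join "\n" st.2.2))
  | none => st.1

-- invariant: the keys of A's dict are always exactly the four section names
def pvHcont (d : PySem.Dict String String) : Prop := ∀ s, d.contains s = pvKeysB.contains s

theorem pvPairs_nil : pvPairs [] = [] := by rw [pvPairs, pvGenPairs]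

theorem pvPairs_cons_none {l : String} (ls : List String) (h : pvHeaderKey l = none) :
    pvPairs (l :: ls) = pvPairs ls := by rw [pvPairs, pvGenPairs, h]

theorem pvPairs_cons_some {l k : String} (ls : List String) (h : pvHeaderKey l = some k) :
    pvPairs (l :: ls) =
      (k, pvC (ls.takeWhile (fun x => !(pvHeaderKey x).isSome))) ::
        pvPairs (ls.dropWhile (fun x => !(pvHeaderKey x).isSome)) := by
  rw [pvPairs, pvGenPairs, h]

theorem pvHcont_insert {d : PySem.Dict String String} {k : String} (v : String)
    (hd : pvHcont d) (hk : pvKeysB.contains k = true) : pvHcont (d.insert k v) := by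
  intro s
  rw [PySem.Dict.contains_insert, hd s]
  by_cases h : s = k
  · subst h
    simp only [beq_self_eq_true, Bool.true_or]
    exact hk.symm
  · simp [h]

theorem pvHcont_init : pvHcont (PySem.Dict.ofList
    [("identity", ""), ("preferences", ""), ("durable facts", ""), ("derived (dialectic)", "")]) := by
  intro s
  rw [PySem.Dict.contains_eq_decide_mem_keys,
      show (PySem.Dict.ofList [("identity", ""), ("preferences", ""), ("durable facts", ""),
            ("derived (dialectic)", "")]).keys = pvKeysB from by decide]
  exact (List.contains_eq_mem s pvKeysB).symm

-- header-line classification used to reduce one step of A's loop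
theorem pvHeaderKey_some {l : String}
    (hH : PySem.Str.startswith (PySem.Str.lower (PySem.Str.strip l)) "## " = true)
    (hK : pvKeysB.contains (pvKeyOf l) = true) : pvHeaderKey l = some (pvKeyOf l) := by
  simp only [pvKeyOf] at hK ⊢
  simp only [pvHeaderKey, hH, hK, reduceIte]

theorem pvHeaderKey_none_unknown {l : String}
    (hK : pvKeysB.contains (pvKeyOf l) = false) : pvHeaderKey l = none := by
  simp only [pvKeyOf] at hK
  simp only [pvHeaderKey, hK, Bool.false_eq_true, reduceIte]
  split <;> rfl

theorem pvHeaderKey_none_plain {l : String}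
    (hH : PySem.Str.startswith (PySem.Str.lower (PySem.Str.strip l)) "## " = false) :
    pvHeaderKey l = none := by
  simp only [pvHeaderKey, hH, Bool.false_eq_true, reduceIte]

-- one step of A's loop, in the three relevant shapes
theorem pvStepA_plain {d : PySem.Dict String String} {cur : Option String} {buf : List String}
    {l : String}
    (hH : PySem.Str.startswith (PySem.Str.lower (PySem.Str.strip l)) "## " = false) :
    pvStepA (d, cur, buf) l = (d, cur, buf ++ [l]) := by
  simp only [pvStepA, hH, Bool.false_eq_true, reduceIte]

theorem pvStepA_some_header {d : PySem.Dict String String} {k : String} {buf : List String}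
    {l : String} (hd : pvHcont d) (hk : pvKeysB.contains k = true)
    (hH : PySem.Str.startswith (PySem.Str.lower (PySem.Str.strip l)) "## " = true) :
    pvStepA (d, some k, buf) l =
      (if pvKeysB.contains (pvKeyOf l) then (d.insert k (pvC buf), some (pvKeyOf l), ([] : List String))
       else (d.insert k (pvC buf), some k, buf ++ [l])) := by
  have hc := pvHcont_insert (pvC buf) hd hk (pvKeyOf l)
  simp only [pvC] at hc ⊢
  simp only [pvKeyOf] at hc ⊢
  simp only [pvStepA, hH, reduceIte, hc]

theorem pvStepA_none_header {d : PySem.Dict String String} {buf : List String}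
    {l : String} (hd : pvHcont d)
    (hH : PySem.Str.startswith (PySem.Str.lower (PySem.Str.strip l)) "## " = true) :
    pvStepA (d, none, buf) l =
      (if pvKeysB.contains (pvKeyOf l) then (d, some (pvKeyOf l), ([] : List String))
       else (d, none, buf ++ [l])) := by
  have hc := hd (pvKeyOf l)
  simp only [pvKeyOf] at hc ⊢
  simp only [pvStepA, hH, reduceIte, hc]

-- === A's loop, characterized by pvPairs ===

theorem lemA2 (N : Nat) : ∀ (ls : List String), ls.length ≤ N →
    ∀ (d : PySem.Dict String String) (k : String) (buf : List String),
    pvHcont d → pvKeysB.contains k = true →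
    pvAfin (ls.foldl pvStepA (d, some k, buf)) =
      pvFoldPairs
        (d.insert k (pvC (buf ++ ls.takeWhile (fun x => !(pvHeaderKey x).isSome))))
        (pvPairs (ls.dropWhile (fun x => !(pvHeaderKey x).isSome))) := by
  induction N with
  | zero =>
    intro ls hls d k buf hd hk
    match ls with
    | [] => simp [pvAfin, pvFoldPairs, pvPairs_nil, pvC]
    | _ :: _ => simp at hls
  | succ N ih =>
    intro ls hls d k buf hd hk
    match ls with
    | [] => simp [pvAfin, pvFoldPairs, pvPairs_nil, pvC]
    | l :: ls' =>
      have hls' : ls'.length ≤ N := by simpa using hls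
      rw [List.foldl_cons]
      by_cases hH : PySem.Str.startswith (PySem.Str.lower (PySem.Str.strip l)) "## " = true
      · by_cases hK : pvKeysB.contains (pvKeyOf l) = true
        · -- recognized header: save, switch section
          rw [pvStepA_some_header hd hk hH, if_pos hK]
          rw [ih ls' hls' _ _ _ (pvHcont_insert (pvC buf) hd hk) hK]
          have hkey := pvHeaderKey_some hH hK
          rw [List.dropWhile_cons_of_neg (by simp [hkey]),
              List.takeWhile_cons_of_neg (by simp [hkey])]
          rw [pvPairs_cons_some ls' hkey]
          simp [pvFoldPairs, List.nil_append, List.append_nil]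
        · -- unknown header: intermediate save, then continuation
          have hK' : pvKeysB.contains (pvKeyOf l) = false := by simpa using hK
          rw [pvStepA_some_header hd hk hH, if_neg (by simpa using hK')]
          rw [ih ls' hls' _ _ _ (pvHcont_insert (pvC buf) hd hk) hk]
          have hkey := pvHeaderKey_none_unknown hK'
          rw [List.dropWhile_cons_of_pos (by simp [hkey]),
              List.takeWhile_cons_of_pos (by simp [hkey])]
          rw [PySem.Dict.insert_insert_self]
          simp [List.append_assoc]
      · -- ordinary line
        have hH' : PySem.Str.startswith (PySem.Str.lower (PySem.Str.strip l)) "## " = false := by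
          simpa using hH
        rw [pvStepA_plain hH']
        rw [ih ls' hls' _ _ _ hd hk]
        have hkey := pvHeaderKey_none_plain hH'
        rw [List.dropWhile_cons_of_pos (by simp [hkey]),
            List.takeWhile_cons_of_pos (by simp [hkey])]
        simp [List.append_assoc]

theorem lemA1 : ∀ (ls : List String) (d : PySem.Dict String String) (buf : List String),
    pvHcont d →
    pvAfin (ls.foldl pvStepA (d, none, buf)) = pvFoldPairs d (pvPairs ls) := by
  intro ls
  induction ls with
  | nil => intro d buf hd; simp [pvAfin, pvFoldPairs, pvPairs_nil]
  | cons l ls ih =>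
    intro d buf hd
    rw [List.foldl_cons]
    by_cases hH : PySem.Str.startswith (PySem.Str.lower (PySem.Str.strip l)) "## " = true
    · by_cases hK : pvKeysB.contains (pvKeyOf l) = true
      · rw [pvStepA_none_header hd hH, if_pos hK]
        rw [lemA2 ls.length ls (Nat.le_refl _) d (pvKeyOf l) [] hd hK]
        rw [pvPairs_cons_some ls (pvHeaderKey_some hH hK)]
        simp [pvFoldPairs, pvC]
      · have hK' : pvKeysB.contains (pvKeyOf l) = false := by simpa using hK
        rw [pvStepA_none_header hd hH, if_neg (by simpa using hK')]
        rw [ih d (buf ++ [l]) hd, pvPairs_cons_none ls (pvHeaderKey_none_unknown hK')]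
    · have hH' : PySem.Str.startswith (PySem.Str.lower (PySem.Str.strip l)) "## " = false := by
        simpa using hH
      rw [pvStepA_plain hH']
      rw [ih d (buf ++ [l]) hd, pvPairs_cons_none ls (pvHeaderKey_none_plain hH')]

-- === B's two passes, characterized by pvPairs ===

def pvHdrsFrom (n : Nat) (ls : List String) : List (Nat × String) :=
  (ls.zipIdx n).filterMap (fun p => (pvHeaderKey p.1).map (fun k => (p.2, k)))

def pvStepB (full : List String) (d : PySem.Dict String String) (p : (Nat × String) × Nat) :
    PySem.Dict String String :=
  d.insert p.1.2 (PySem.Str.strip (PySem.Str.join "\n"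
    (PySem.List.slice full (some ((p.1.1 + 1 : Nat) : Int)) (some ((p.2 : Nat) : Int)))))

def pvFz (full : List String) (n : Nat) (ls : List String) (d : PySem.Dict String String) :
    PySem.Dict String String :=
  ((pvHdrsFrom n ls).zip (((pvHdrsFrom n ls).drop 1).map Prod.fst ++ [full.length])).foldl
    (pvStepB full) d

theorem pvHdrsFrom_nil (n : Nat) : pvHdrsFrom n [] = [] := rfl

theorem pvHdrsFrom_cons_none {l : String} (n : Nat) (ls : List String)
    (h : pvHeaderKey l = none) : pvHdrsFrom n (l :: ls) = pvHdrsFrom (n + 1) ls := by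
  simp [pvHdrsFrom, List.zipIdx_cons, h]

theorem pvHdrsFrom_cons_some {l k : String} (n : Nat) (ls : List String)
    (h : pvHeaderKey l = some k) :
    pvHdrsFrom n (l :: ls) = (n, k) :: pvHdrsFrom (n + 1) ls := by
  simp [pvHdrsFrom, List.zipIdx_cons, h]

theorem pvHdrsFrom_skip : ∀ (xs : List String), (∀ x ∈ xs, pvHeaderKey x = none) →
    ∀ (ys : List String) (n : Nat), pvHdrsFrom n (xs ++ ys) = pvHdrsFrom (n + xs.length) ys := by
  intro xs
  induction xs with
  | nil => intro _ ys n; simp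
  | cons x xs ih =>
    intro hall ys n
    rw [List.cons_append, pvHdrsFrom_cons_none n _ (hall x (by simp)),
        ih (fun y hy => hall y (by simp [hy])) ys (n + 1)]
    congr 1
    simp only [List.length_cons]
    omega

-- the slice between two absolute positions, read off the remaining suffix
theorem pvSlice_eq {full ls : List String} {n : Nat} (h : full.drop n = ls) (e : Nat) :
    PySem.List.slice full (some ((n + 1 : Nat) : Int)) (some ((n + 1 + e : Nat) : Int)) =
      (ls.drop 1).take e := by
  rw [PySem.List.slice_natCast]
  rw [show n + 1 + e - (n + 1) = e by omega]
  rw [← h, List.drop_drop]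

theorem lemB (N : Nat) : ∀ (ls : List String), ls.length ≤ N →
    ∀ (full : List String) (n : Nat) (d : PySem.Dict String String),
    full.drop n = ls → n ≤ full.length →
    pvFz full n ls d = pvFoldPairs d (pvPairs ls) := by
  induction N with
  | zero =>
    intro ls hls full n d hdrop hn
    match ls with
    | [] => simp [pvFz, pvHdrsFrom_nil, pvFoldPairs, pvPairs_nil]
    | _ :: _ => simp at hls
  | succ N ih =>
    intro ls hls full n d hdrop hn
    match ls with
    | [] => simp [pvFz, pvHdrsFrom_nil, pvFoldPairs, pvPairs_nil]
    | l :: ls' =>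
      have hls' : ls'.length ≤ N := by simpa using hls
      have hlen : full.length = n + 1 + ls'.length := by
        have := congrArg List.length hdrop
        simp [List.length_drop] at this
        omega
      have hdrop1 : full.drop (n + 1) = ls' := by
        have : full.drop (n + 1) = (full.drop n).drop 1 := by rw [List.drop_drop]
        rw [this, hdrop]; rfl
      cases hkey : pvHeaderKey l with
      | none =>
        have : pvFz full n (l :: ls') d = pvFz full (n + 1) ls' d := by
          unfold pvFz
          rw [pvHdrsFrom_cons_none n _ hkey]
        rw [this, ih ls' hls' full (n + 1) d hdrop1 (by omega),
            pvPairs_cons_none ls' hkey]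
      | some k =>
        -- split the tail at the next recognized header
        set p : String → Bool := fun x => !(pvHeaderKey x).isSome with hp
        have hsplit : ls'.takeWhile p ++ ls'.dropWhile p = ls' := List.takeWhile_append_dropWhile
        have htwnone : ∀ x ∈ ls'.takeWhile p, pvHeaderKey x = none := by
          intro x hx
          have := List.mem_takeWhile_imp hx
          rw [hp] at this
          simpa using this
        have hhdrs' : pvHdrsFrom (n + 1) ls' =
            pvHdrsFrom (n + 1 + (ls'.takeWhile p).length) (ls'.dropWhile p) := by
          conv_lhs => rw [← hsplit]
          exact pvHdrsFrom_skip _ htwnone _ _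
        have hdropm : full.drop (n + 1 + (ls'.takeWhile p).length) = ls'.dropWhile p := by
          rw [← List.drop_drop, hdrop1]
          nth_rewrite 2 [← hsplit]
          rw [List.drop_left]
        have hmle : n + 1 + (ls'.takeWhile p).length ≤ full.length := by
          have := (List.takeWhile_sublist (l := ls') p).length_le
          omega
        -- the first section's content is exactly the lines up to the next header
        cases hdw : ls'.dropWhile p with
        | nil =>
          have htw : ls'.takeWhile p = ls' := by
            conv_rhs => rw [← hsplit]
            rw [hdw, List.append_nil]
          have hone : pvFz full n (l :: ls') d =
              pvStepB full d ((n, k), full.length) := by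
            unfold pvFz
            rw [pvHdrsFrom_cons_some n _ hkey, hhdrs', hdw, pvHdrsFrom_nil]
            rfl
          rw [hone, pvPairs_cons_some ls' hkey, hdw, pvPairs_nil, htw]
          have hsl : PySem.List.slice full (some ((n + 1 : Nat) : Int))
              (some ((full.length : Nat) : Int)) = ls' := by
            have : full.length = n + 1 + ls'.length := hlen
            rw [this, pvSlice_eq hdrop ls'.length]
            simp
          simp only [pvStepB, pvFoldPairs, List.foldl_cons, List.foldl_nil, hsl]
          rfl
        | cons h' rest =>
          have hph' : p h' = false := by
            have h1 : ls'.dropWhile p ≠ [] := by simp [hdw]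
            have := List.head_dropWhile_not p h1
            simp only [hdw, List.head_cons] at this
            exact this
          obtain ⟨k', hk'⟩ : ∃ k', pvHeaderKey h' = some k' := by
            rw [hp] at hph'
            simp at hph'
            exact Option.isSome_iff_exists.mp hph'
          have hfz : pvFz full n (l :: ls') d =
              pvFz full (n + 1 + (ls'.takeWhile p).length) (ls'.dropWhile p)
                (pvStepB full d ((n, k), n + 1 + (ls'.takeWhile p).length)) := by
            unfold pvFz
            rw [pvHdrsFrom_cons_some n _ hkey, hhdrs', hdw, pvHdrsFrom_cons_some _ _ hk']
            rfl
          have hdwlen : (h' :: rest).length ≤ N := by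
            have := List.length_dropWhile_le p ls'
            rw [hdw] at this
            omega
          rw [hdw] at hdropm
          rw [hfz, hdw]
          rw [ih (h' :: rest) hdwlen full _ _ hdropm hmle]
          rw [pvPairs_cons_some ls' hkey, ← hp, hdw]
          have hsl : PySem.List.slice full (some ((n + 1 : Nat) : Int))
              (some ((n + 1 + (ls'.takeWhile p).length : Nat) : Int)) = ls'.takeWhile p := by
            rw [pvSlice_eq hdrop]
            simp only [List.drop_one, List.tail_cons]
            nth_rewrite 2 [← hsplit]
            rw [List.take_left]
          simp only [pvFoldPairs, List.foldl_cons, pvStepB, hsl, pvC]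

-- the two initial dicts are the same concrete dict
theorem pvInit_eq :
    pvKeysB.foldl (fun d k => d.insert k "") PySem.Dict.empty =
      PySem.Dict.ofList [("identity", ""), ("preferences", ""),
                         ("durable facts", ""), ("derived (dialectic)", "")] := by
  decide

-- ===== VERDICT (by name: the statement is the Claim_ definition above) =====
theorem parse_body_sections_py_spec : Claim_equal_parse_body_sections_py := by
  intro body _
  unfold Spec_parse_body_sections_py
  have hA : parse_body_sections_py body =
      ((pvAfin ((PySem.Str.splitlines body).foldl pvStepA
          (PySem.Dict.ofList [("identity", ""), ("preferences", ""),
                              ("durable facts", ""), ("derived (dialectic)", "")], none,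
           ([] : List String)))).getD "identity" "",
       (pvAfin ((PySem.Str.splitlines body).foldl pvStepA
          (PySem.Dict.ofList [("identity", ""), ("preferences", ""),
                              ("durable facts", ""), ("derived (dialectic)", "")], none,
           ([] : List String)))).getD "preferences" "",
       (pvAfin ((PySem.Str.splitlines body).foldl pvStepA
          (PySem.Dict.ofList [("identity", ""), ("preferences", ""),
                              ("durable facts", ""), ("derived (dialectic)", "")], none,
           ([] : List String)))).getD "durable facts" "",
       (pvAfin ((PySem.Str.splitlines body).foldl pvStepA
          (PySem.Dict.ofList [("identity", ""), ("preferences", ""),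
                              ("durable facts", ""), ("derived (dialectic)", "")], none,
           ([] : List String)))).getD "derived (dialectic)" "") := rfl
  have hB : parse_body_sections_py_alt body =
      ((pvFz (PySem.Str.splitlines body) 0 (PySem.Str.splitlines body)
          (pvKeysB.foldl (fun d k => d.insert k "") PySem.Dict.empty)).getD "identity" "",
       (pvFz (PySem.Str.splitlines body) 0 (PySem.Str.splitlines body)
          (pvKeysB.foldl (fun d k => d.insert k "") PySem.Dict.empty)).getD "preferences" "",
       (pvFz (PySem.Str.splitlines body) 0 (PySem.Str.splitlines body)
          (pvKeysB.foldl (fun d k => d.insert k "") PySem.Dict.empty)).getD "durable facts" "",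
       (pvFz (PySem.Str.splitlines body) 0 (PySem.Str.splitlines body)
          (pvKeysB.foldl (fun d k => d.insert k "") PySem.Dict.empty)).getD "derived (dialectic)" "") := rfl
  have hAB : pvAfin ((PySem.Str.splitlines body).foldl pvStepA
      (PySem.Dict.ofList [("identity", ""), ("preferences", ""),
                          ("durable facts", ""), ("derived (dialectic)", "")], none,
       ([] : List String))) =
      pvFz (PySem.Str.splitlines body) 0 (PySem.Str.splitlines body)
        (pvKeysB.foldl (fun d k => d.insert k "") PySem.Dict.empty) := by
    rw [lemA1 _ _ _ pvHcont_init,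
        lemB (PySem.Str.splitlines body).length (PySem.Str.splitlines body) (Nat.le_refl _)
          (PySem.Str.splitlines body) 0 _ rfl (Nat.zero_le _),
        pvInit_eq]
  rw [hA, hB, hAB]
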